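-- pv_equiv track=rewrite | github.com/aisarllo/SME0332 | trabalhos/trabalho08.py | EliminarTab
-- ===== SOURCE A (Python) =====
-- from copy import deepcopy
--
-- def contar1(tabela):
--     contagem = 0
--     for linha in tabela:
--         contagem += linha.count(1)
--     return contagem
--
-- def EliminarTab(tab, elim):
--     tabcop = deepcopy(tab)
--     if len(tab)%2 == 0:
--         if elim == 0 or contar1(tabcop) == 0:
--             return (tabcop, elim, contar1(tabcop))
--         elif elim > 0:
--             for linha in tabcop:
--                 for elemento in linha:
--                     if elemento == 1:
--                         linha[linha.index(elemento)] = 0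
--                         elimNova = elim - 1
--                         break
--                 else:
--                     continue
--                 break
--             return EliminarTab(tabcop, elimNova)
--     elif len(tab)%2 != 0:
--         if elim == 0 or contar1(tabcop) == 0:
--             return (tabcop, elim, contar1(tabcop))
--         elif elim > 0:
--             for coluna in range(len(tabcop[0])):
--                 for linha in range(len(tabcop)):
--                     if tabcop[linha][coluna] == 1:
--                         tabcop[linha][coluna] = 0
--                         elimNova = elim - 1
--                         break
--                 else:
--                     continue
--                 break
--             return EliminarTab(tabcop, elimNova)
-- ===== SOURCE B (Python) =====
-- def _pass(rows, rem):
--     # zero ones while budget lasts, count leftover ones, in one sweep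
--     ones = 0
--     for row in rows:
--         for j, x in enumerate(row):
--             if x == 1:
--                 if rem > 0:
--                     row[j] = 0
--                     rem -= 1
--                 else:
--                     ones += 1
--     return rows, rem, ones
--
-- def EliminarTab(tab, elim):
--     rows = [list(r) for r in tab]
--     if len(rows) % 2 == 0:
--         # row-major sweep
--         rows, rem, ones = _pass(rows, elim)
--     else:
--         # column-major sweep
--         rem, ones = elim, 0
--         for j in range(len(rows[0])):
--             for i in range(len(rows)):
--                 if j < len(rows[i]) and rows[i][j] == 1:
--                     if rem > 0:
--                         rows[i][j] = 0
--                         rem -= 1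
--                     else:
--                         ones += 1
--     return (rows, rem, ones)
-- ===== Notes on version B (the rewrite author's own statement) =====
-- stated objective: faster
-- what changed: Replaces A's recursion that re-copies and rescans the whole table to zero one 1 per step with a single in-order sweep that zeroes 1s while the budget lasts and counts the leftover 1s on the fly.
-- outside the precondition, e.g. on EliminarTab([[1], [0, 1], []], 1): A returns ([[0], [0, 1], []], 0, 1), B returns ([[0], [0, 1], []], 0, 0)
import Mathlib
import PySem

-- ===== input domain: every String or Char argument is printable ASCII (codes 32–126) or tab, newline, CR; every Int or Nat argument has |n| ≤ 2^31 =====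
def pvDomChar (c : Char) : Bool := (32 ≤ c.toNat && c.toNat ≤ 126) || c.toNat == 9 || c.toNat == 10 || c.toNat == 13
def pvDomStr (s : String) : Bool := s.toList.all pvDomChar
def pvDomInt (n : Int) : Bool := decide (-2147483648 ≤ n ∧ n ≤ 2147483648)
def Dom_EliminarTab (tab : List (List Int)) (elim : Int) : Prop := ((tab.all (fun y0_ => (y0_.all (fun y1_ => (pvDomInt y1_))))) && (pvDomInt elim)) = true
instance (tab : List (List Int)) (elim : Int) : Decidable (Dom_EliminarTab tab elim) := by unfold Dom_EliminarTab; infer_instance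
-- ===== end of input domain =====

-- B replaces A's recursion (full table copy + rescan per eliminated 1) by one sweep in the
-- same order that zeroes 1s while the budget lasts and counts the leftover 1s on the fly.
-- A mutates only its own deepcopy, so the return value is the whole observable behaviour.

-- ===== PORT A =====
def contar1 (tabela : List (List Int)) : Int :=
  tabela.foldl (fun contagem linha => contagem + (PySem.List.count linha 1 : Int)) 0

-- even branch: find the first row containing a 1, zero its first 1 (linha.index(1))
def zeroRowA : List (List Int) → List (List Int)
  | [] => []
  | linha :: rest =>
    match PySem.List.index? linha 1 with
    | some i => (linha.set i 0) :: rest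
    | none => linha :: zeroRowA rest

-- odd branch: tabcop[linha][coluna]; row index is always in range, the column access is
-- exact on the rectangular tables Pre_ admits (getD totalises the excluded ragged case)
def findColA : List (List Int) → Nat → Option Nat
  | [], _ => none
  | linha :: rest, c =>
    if linha.getD c 0 = 1 then some 0 else (findColA rest c).map (· + 1)

def setColA (tab : List (List Int)) (r c : Nat) : List (List Int) :=
  tab.set r ((tab.getD r []).set c 0)

def zeroColA (tab : List (List Int)) (c : Nat) : Nat → List (List Int)
  | 0 => tab  -- column loop exhausted without a 1: Python's elimNova is unbound (outside Pre_)
  | fuel + 1 =>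
    match findColA tab c with
    | some r => setColA tab r c
    | none => zeroColA tab (c + 1) fuel

def EliminarTab (tab : List (List Int)) (elim : Int) : List (List Int) × Int × Int :=
  if tab.length % 2 = 0 then
    if elim = 0 ∨ contar1 tab = 0 then (tab, elim, contar1 tab)
    else if 0 < elim then EliminarTab (zeroRowA tab) (elim - 1)
    else (tab, elim, contar1 tab)  -- Python falls through returning None here (elim < 0): excluded by Pre_
  else
    if elim = 0 ∨ contar1 tab = 0 then (tab, elim, contar1 tab)
    else if 0 < elim then EliminarTab (zeroColA tab 0 (tab.headD []).length) (elim - 1)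
    else (tab, elim, contar1 tab)  -- Python returns None here too: excluded by Pre_
termination_by elim.toNat
decreasing_by all_goals omega

-- ===== PORT B =====
-- _pass, inner loop: for j, x in enumerate(row)
def passRowB : Int → Int → List Int → List Int × Int × Int
  | rem, ones, [] => ([], rem, ones)
  | rem, ones, x :: xs =>
    if x = 1 then
      if 0 < rem then
        let (ys, r, o) := passRowB (rem - 1) ones xs
        ((0 : Int) :: ys, r, o)
      else
        let (ys, r, o) := passRowB rem (ones + 1) xs
        (x :: ys, r, o)
    else
      let (ys, r, o) := passRowB rem ones xs
      (x :: ys, r, o)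

-- _pass, outer loop: for row in rows
def passRowsB : Int → Int → List (List Int) → List (List Int) × Int × Int
  | rem, ones, [] => ([], rem, ones)
  | rem, ones, row :: rest =>
    let (row', r, o) := passRowB rem ones row
    let (t, r', o') := passRowsB r o rest
    (row' :: t, r', o')

-- odd branch, inner loop: for i in range(len(rows)) — 'j < len(rows[i]) and rows[i][j] == 1' is exactly getD j 0 = 1
def passColRowsB : List (List Int) → Nat → Int → Int → List (List Int) × Int × Int
  | [], _, rem, ones => ([], rem, ones)
  | row :: rest, c, rem, ones =>
    if row.getD c 0 = 1 then
      if 0 < rem then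
        let (t, r, o) := passColRowsB rest c (rem - 1) ones
        ((row.set c 0) :: t, r, o)
      else
        let (t, r, o) := passColRowsB rest c rem (ones + 1)
        (row :: t, r, o)
    else
      let (t, r, o) := passColRowsB rest c rem ones
      (row :: t, r, o)

-- odd branch, outer loop: for j in range(len(rows[0]))
def passColsB : List (List Int) → Nat → Nat → Int → Int → List (List Int) × Int × Int
  | tab, _, 0, rem, ones => (tab, rem, ones)
  | tab, c, fuel + 1, rem, ones =>
    let (t, r, o) := passColRowsB tab c rem ones
    passColsB t (c + 1) fuel r o

def EliminarTab_alt (tab : List (List Int)) (elim : Int) : List (List Int) × Int × Int :=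
  if tab.length % 2 = 0 then passRowsB elim 0 tab
  else passColsB tab 0 (tab.headD []).length elim 0

-- ===== PRECONDITION & SPEC =====
-- Pre_ excludes negative elim when the table still has a 1 (there A returns None, not a value of the
-- declared type) and, for odd-height tables containing a 1, ragged rows (there A's column scan in
-- general raises IndexError or UnboundLocalError, and where it happens to return its value is an
-- accident of scanning only row 0's columns).
def Pre_EliminarTab (tab : List (List Int)) (elim : Int) : Prop :=
  (0 ≤ elim ∨ ∀ r ∈ tab, (1 : Int) ∉ r) ∧
    (tab.length % 2 = 1 ∧ ¬ (∀ r ∈ tab, (1 : Int) ∉ r) →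
      ∀ r ∈ tab, r.length = (tab.headD []).length)
instance (tab : List (List Int)) (elim : Int) : Decidable (Pre_EliminarTab tab elim) := by
  unfold Pre_EliminarTab; infer_instance

def pvWitness_EliminarTab : List (List Int) × Int := ([[1, 0], [0, 1], [1, 1]], 2)

def Spec_EliminarTab (tab : List (List Int)) (elim : Int) (out : List (List Int) × Int × Int) : Prop := out = EliminarTab_alt tab elim
instance (tab : List (List Int)) (elim : Int) (out : List (List Int) × Int × Int) : Decidable (Spec_EliminarTab tab elim out) := by unfold Spec_EliminarTab; infer_instance

-- ===== CLAIM (what is proved, stated in full; the proofs are below) =====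
def Claim_equal_EliminarTab : Prop := ∀ (tab : List (List Int)) (elim : Int), Dom_EliminarTab tab elim → Pre_EliminarTab tab elim → Spec_EliminarTab tab elim (EliminarTab tab elim)

-- ===== LEMMAS AND PROOFS =====

-- contar1 as a shifted fold
theorem contar1_foldl (tab : List (List Int)) (a : Int) :
    tab.foldl (fun c l => c + (PySem.List.count l 1 : Int)) a = a + contar1 tab := by
  induction tab generalizing a with
  | nil => simp [contar1]
  | cons row rest ih =>
    simp only [contar1, List.foldl_cons]
    rw [ih, ih]
    ring

theorem contar1_cons (row : List Int) (rest : List (List Int)) :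
    contar1 (row :: rest) = (PySem.List.count row 1 : Int) + contar1 rest := by
  show (row :: rest).foldl _ 0 = _
  rw [List.foldl_cons, contar1_foldl]; ring

theorem contar1_nonneg (tab : List (List Int)) : 0 ≤ contar1 tab := by
  induction tab with
  | nil => simp [contar1]
  | cons row rest ih => rw [contar1_cons]; positivity

theorem not_mem_of_contar1_zero (tab : List (List Int)) (h : contar1 tab = 0) :
    ∀ row ∈ tab, (1 : Int) ∉ row := by
  induction tab with
  | nil => simp
  | cons r rest ih =>
    rw [contar1_cons] at h
    have h1 : (PySem.List.count r 1 : Int) = 0 ∧ contar1 rest = 0 := by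
      have := contar1_nonneg rest
      constructor <;> omega
    intro row hrow
    rw [List.mem_cons] at hrow
    rcases hrow with rfl | hrow
    · intro hm
      have : 0 < PySem.List.count row 1 := by
        rw [PySem.List.count_eq]; exact List.count_pos_iff.mpr hm
      omega
    · exact ih h1.2 row hrow

theorem count_cons_int (x : Int) (xs : List Int) :
    (PySem.List.count (x :: xs) 1 : Int)
      = (if x = 1 then 1 else 0) + (PySem.List.count xs 1 : Int) := by
  simp only [PySem.List.count_eq, List.count_cons]
  by_cases hx : x = 1 <;> simp [hx] <;> push_cast <;> ring

theorem contar1_eq_zero_iff (tab : List (List Int)) :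
    contar1 tab = 0 ↔ ∀ row ∈ tab, (1 : Int) ∉ row := by
  constructor
  · exact not_mem_of_contar1_zero tab
  · intro h
    induction tab with
    | nil => simp [contar1]
    | cons r rest ih =>
      rw [contar1_cons, PySem.List.count_eq,
        List.count_eq_zero.mpr (h r (by simp)),
        ih (fun row hrow => h row (by simp [hrow]))]
      simp

-- ---------- even side ----------
theorem passRowB_no_one (rem ones : Int) (row : List Int) (h : (1 : Int) ∉ row) :
    passRowB rem ones row = (row, rem, ones) := by
  induction row generalizing rem ones with
  | nil => rfl
  | cons x xs ih =>
    have hx : x ≠ 1 := by intro hx; exact h (by simp [hx])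
    have hxs : (1 : Int) ∉ xs := fun hm => h (by simp [hm])
    simp [passRowB, hx, ih _ _ hxs]

theorem passRowB_nonpos (rem ones : Int) (row : List Int) (h : rem ≤ 0) :
    passRowB rem ones row = (row, rem, ones + (PySem.List.count row 1 : Int)) := by
  induction row generalizing ones with
  | nil => simp [passRowB, PySem.List.count]
  | cons x xs ih =>
    rw [count_cons_int]
    by_cases hx : x = 1
    · simp only [passRowB, if_pos hx, if_neg (show ¬ (0:Int) < rem by omega)]
      rw [ih (ones + 1)]
      simp only [if_pos hx, Prod.mk.injEq, true_and]
      ring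
    · simp only [passRowB, if_neg hx]
      rw [ih ones]
      simp only [if_neg hx, Prod.mk.injEq, true_and]
      ring

theorem passRowB_step (rem ones : Int) (row : List Int) (i : Nat)
    (h : 0 < rem) (hi : PySem.List.index? row 1 = some i) :
    passRowB rem ones row = passRowB (rem - 1) ones (row.set i 0) := by
  induction row generalizing i with
  | nil => simp [PySem.List.index?_eq_idxOf?] at hi
  | cons x xs ih =>
    by_cases hx : x = 1
    · subst hx
      rw [PySem.List.index?_cons_self] at hi
      cases hi
      simp [passRowB, h, List.set]
    · rw [PySem.List.index?_cons_of_ne xs hx] at hi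
      rcases Option.map_eq_some_iff.mp hi with ⟨i', hi', rfl⟩
      simp only [List.set, passRowB, if_neg hx]
      rw [ih i' hi']

theorem passRowsB_no_one (rem ones : Int) (tab : List (List Int)) (h : contar1 tab = 0) :
    passRowsB rem ones tab = (tab, rem, ones) := by
  induction tab generalizing rem ones with
  | nil => rfl
  | cons row rest ih =>
    have hm := not_mem_of_contar1_zero _ h
    rw [contar1_cons] at h
    have hrest : contar1 rest = 0 := by
      have := contar1_nonneg rest
      have : (0:Int) ≤ (PySem.List.count row 1 : Int) := by positivity
      omega
    simp [passRowsB, passRowB_no_one rem ones row (hm row (by simp)), ih _ _ hrest]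

theorem passRowsB_nonpos (rem ones : Int) (tab : List (List Int)) (h : rem ≤ 0) :
    passRowsB rem ones tab = (tab, rem, ones + contar1 tab) := by
  induction tab generalizing ones with
  | nil => simp [passRowsB, contar1]
  | cons row rest ih =>
    simp [passRowsB, passRowB_nonpos rem ones row h, ih _, contar1_cons]
    ring

theorem zeroRowA_length (tab : List (List Int)) : (zeroRowA tab).length = tab.length := by
  induction tab with
  | nil => rfl
  | cons row rest ih =>
    unfold zeroRowA
    cases h : PySem.List.index? row 1 <;> simp [ih]

theorem passRowsB_step (rem ones : Int) (tab : List (List Int))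
    (h : 0 < rem) (hc : contar1 tab ≠ 0) :
    passRowsB rem ones tab = passRowsB (rem - 1) ones (zeroRowA tab) := by
  induction tab generalizing ones with
  | nil => simp [contar1] at hc
  | cons row rest ih =>
    unfold zeroRowA
    cases hidx : PySem.List.index? row 1 with
    | some i =>
      simp only [passRowsB]
      rw [passRowB_step rem ones row i h hidx]
    | none =>
      have hrow : (1 : Int) ∉ row := (PySem.List.index?_eq_none_iff row 1).mp hidx
      have hcnt : (PySem.List.count row 1 : Int) = 0 := by
        rw [PySem.List.count_eq]
        simp [List.count_eq_zero.mpr hrow]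
      have hrest : contar1 rest ≠ 0 := by
        rw [contar1_cons] at hc; omega
      simp only [passRowsB]
      rw [passRowB_no_one rem ones row hrow, passRowB_no_one (rem - 1) ones row hrow]
      simp only []
      rw [ih ones hrest]

-- ---------- odd side : counting helpers (proof-only) ----------
def colCnt : List (List Int) → Nat → Int
  | [], _ => 0
  | row :: rest, c => (if row.getD c 0 = 1 then 1 else 0) + colCnt rest c

def colSum : List (List Int) → Nat → Nat → Int
  | _, _, 0 => 0
  | tab, c, fuel + 1 => colCnt tab c + colSum tab (c + 1) fuel

def rowSum : List Int → Nat → Nat → Int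
  | _, _, 0 => 0
  | row, c, fuel + 1 => (if row.getD c 0 = 1 then 1 else 0) + rowSum row (c + 1) fuel

theorem getD_ne_one_of_not_mem (row : List Int) (c : Nat) (h : (1 : Int) ∉ row) :
    row.getD c 0 ≠ 1 := by
  intro hc
  rw [List.getD] at hc
  cases hg : row[c]? with
  | none => rw [hg] at hc; simp at hc
  | some x =>
    rw [hg] at hc
    simp at hc
    subst hc
    exact h (List.mem_of_getElem? hg)

theorem passColRowsB_none (tab : List (List Int)) (c : Nat) (rem ones : Int)
    (h : ∀ row ∈ tab, row.getD c 0 ≠ 1) :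
    passColRowsB tab c rem ones = (tab, rem, ones) := by
  induction tab generalizing rem ones with
  | nil => rfl
  | cons row rest ih =>
    have hr : ¬ row.getD c 0 = 1 := h row (by simp)
    simp only [passColRowsB, if_neg hr]
    rw [ih rem ones (fun r hrm => h r (by simp [hrm]))]

theorem passColRowsB_nonpos (tab : List (List Int)) (c : Nat) (rem ones : Int) (h : rem ≤ 0) :
    passColRowsB tab c rem ones = (tab, rem, ones + colCnt tab c) := by
  induction tab generalizing ones with
  | nil => simp [passColRowsB, colCnt]
  | cons row rest ih =>
    by_cases hr : row.getD c 0 = 1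
    · simp only [passColRowsB, if_pos hr, if_neg (show ¬ (0:Int) < rem by omega)]
      rw [ih (ones + 1)]
      simp only [colCnt, if_pos hr, Prod.mk.injEq, true_and]
      ring
    · simp only [passColRowsB, if_neg hr]
      rw [ih ones]
      simp only [colCnt, if_neg hr, Prod.mk.injEq, true_and]
      ring

theorem findColA_none (tab : List (List Int)) (c : Nat) (h : findColA tab c = none) :
    ∀ row ∈ tab, row.getD c 0 ≠ 1 := by
  induction tab with
  | nil => simp
  | cons row rest ih =>
    unfold findColA at h
    by_cases hr : row.getD c 0 = 1
    · rw [if_pos hr] at h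
      cases h
    · rw [if_neg hr] at h
      have hrest : findColA rest c = none := Option.map_eq_none_iff.mp h
      intro r hmem
      rw [List.mem_cons] at hmem
      rcases hmem with rfl | hmem
      · exact hr
      · exact ih hrest r hmem

theorem colCnt_of_none (tab : List (List Int)) (c : Nat) (h : findColA tab c = none) :
    colCnt tab c = 0 := by
  induction tab with
  | nil => rfl
  | cons row rest ih =>
    unfold findColA at h
    by_cases hr : row.getD c 0 = 1
    · rw [if_pos hr] at h
      cases h
    · rw [if_neg hr] at h
      have hrest : findColA rest c = none := Option.map_eq_none_iff.mp h
      simp only [colCnt, if_neg hr, ih hrest]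
      ring

theorem setColA_cons_succ (row : List Int) (rest : List (List Int)) (r c : Nat) :
    setColA (row :: rest) (r + 1) c = row :: setColA rest r c := by
  simp [setColA]

theorem getD_set_self_ne_one (row : List Int) (c : Nat) : (row.set c 0).getD c 0 ≠ 1 := by
  rw [List.getD]
  by_cases h : c < row.length
  · rw [List.getElem?_set_self (by simpa using h)]
    simp
  · rw [List.getElem?_eq_none (by simp; omega)]
    simp

theorem passColRowsB_step (tab : List (List Int)) (c : Nat) (rem ones : Int) (r : Nat)
    (h : 0 < rem) (hr : findColA tab c = some r) :
    passColRowsB tab c rem ones = passColRowsB (setColA tab r c) c (rem - 1) ones := by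
  induction tab generalizing r ones with
  | nil => simp [findColA] at hr
  | cons row rest ih =>
    unfold findColA at hr
    by_cases hx : row.getD c 0 = 1
    · rw [if_pos hx] at hr
      cases hr
      have hset : setColA (row :: rest) 0 c = (row.set c 0) :: rest := by simp [setColA]
      rw [hset]
      simp only [passColRowsB, if_pos hx, if_pos h, if_neg (getD_set_self_ne_one row c)]
    · rw [if_neg hx] at hr
      rcases Option.map_eq_some_iff.mp hr with ⟨r', hr', rfl⟩
      rw [setColA_cons_succ]
      simp only [passColRowsB, if_neg hx]
      rw [ih _ _ hr']

-- every row of zeroColA's result is a row of tab with possibly one entry set to 0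
theorem setColA_rows (tab : List (List Int)) (r c : Nat) :
    ∀ row ∈ setColA tab r c, row ∈ tab ∨ ∃ orig ∈ tab, row = orig.set c 0 := by
  intro row hrow
  unfold setColA at hrow
  by_cases hlt : r < tab.length
  · rcases List.mem_or_eq_of_mem_set hrow with hmem | rfl
    · exact Or.inl hmem
    · refine Or.inr ⟨tab.getD r [], ?_, rfl⟩
      rw [List.getD_eq_getElem _ _ hlt]
      exact List.getElem_mem hlt
  · rw [List.set_eq_of_length_le (by omega)] at hrow
    exact Or.inl hrow

theorem zeroColA_rows (tab : List (List Int)) (c fuel : Nat) :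
    ∀ row ∈ zeroColA tab c fuel, row ∈ tab ∨ ∃ orig ∈ tab, ∃ c', row = orig.set c' 0 := by
  induction fuel generalizing c with
  | zero => intro row hrow; exact Or.inl hrow
  | succ fuel ih =>
    intro row hrow
    unfold zeroColA at hrow
    cases hf : findColA tab c with
    | some r =>
      rw [hf] at hrow
      rcases setColA_rows tab r c row hrow with hmem | ⟨orig, horig, heq⟩
      · exact Or.inl hmem
      · exact Or.inr ⟨orig, horig, c, heq⟩
    | none =>
      rw [hf] at hrow
      exact ih (c + 1) row hrow

theorem zeroColA_length (tab : List (List Int)) (c fuel : Nat) :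
    (zeroColA tab c fuel).length = tab.length := by
  induction fuel generalizing c with
  | zero => rfl
  | succ fuel ih =>
    unfold zeroColA
    cases hf : findColA tab c with
    | some r => simp [setColA]
    | none => exact ih (c + 1)

theorem zeroColA_rect (tab : List (List Int)) (c fuel w : Nat)
    (h : ∀ row ∈ tab, row.length = w) :
    ∀ row ∈ zeroColA tab c fuel, row.length = w := by
  intro row hrow
  rcases zeroColA_rows tab c fuel row hrow with hmem | ⟨orig, horig, c', rfl⟩
  · exact h row hmem
  · simp [h orig horig]

theorem getD_set_other_ne_one (row : List Int) (c c' : Nat) (h : row.getD c 0 ≠ 1) :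
    (row.set c' 0).getD c 0 ≠ 1 := by
  by_cases hc : c' = c
  · subst hc; exact getD_set_self_ne_one row c'
  · rw [List.getD, List.getElem?_set_ne (by omega)]
    exact h

theorem zeroColA_col_preserve (tab : List (List Int)) (c c' fuel : Nat)
    (h : ∀ row ∈ tab, row.getD c 0 ≠ 1) :
    ∀ row ∈ zeroColA tab c' fuel, row.getD c 0 ≠ 1 := by
  intro row hrow
  rcases zeroColA_rows tab c' fuel row hrow with hmem | ⟨orig, horig, c'', rfl⟩
  · exact h row hmem
  · exact getD_set_other_ne_one orig c c'' (h orig horig)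

theorem passColsB_no_one (tab : List (List Int)) (c fuel : Nat) (rem ones : Int)
    (h : contar1 tab = 0) :
    passColsB tab c fuel rem ones = (tab, rem, ones) := by
  induction fuel generalizing c with
  | zero => rfl
  | succ fuel ih =>
    have hnd : ∀ row ∈ tab, row.getD c 0 ≠ 1 := fun row hrow =>
      getD_ne_one_of_not_mem row c (not_mem_of_contar1_zero tab h row hrow)
    simp only [passColsB]
    rw [passColRowsB_none tab c rem ones hnd]
    exact ih (c + 1)

theorem passColsB_nonpos (tab : List (List Int)) (c fuel : Nat) (rem ones : Int) (h : rem ≤ 0) :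
    passColsB tab c fuel rem ones = (tab, rem, ones + colSum tab c fuel) := by
  induction fuel generalizing c ones with
  | zero => simp [passColsB, colSum]
  | succ fuel ih =>
    simp only [passColsB]
    rw [passColRowsB_nonpos tab c rem ones h]
    simp only []
    rw [ih (c + 1) _, colSum]
    ring_nf

theorem colSum_nil (c fuel : Nat) : colSum [] c fuel = 0 := by
  induction fuel generalizing c with
  | zero => rfl
  | succ fuel ih => simp [colSum, colCnt, ih]

theorem colSum_cons (row : List Int) (rest : List (List Int)) (c fuel : Nat) :
    colSum (row :: rest) c fuel = rowSum row c fuel + colSum rest c fuel := by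
  induction fuel generalizing c with
  | zero => simp [colSum, rowSum]
  | succ fuel ih => simp [colSum, rowSum, colCnt, ih]; ring

theorem rowSum_succ_cons (x : Int) (xs : List Int) (c fuel : Nat) :
    rowSum (x :: xs) (c + 1) fuel = rowSum xs c fuel := by
  induction fuel generalizing c with
  | zero => rfl
  | succ fuel ih => simp [rowSum, List.getD_cons_succ, ih]

theorem rowSum_len (row : List Int) : rowSum row 0 row.length = (PySem.List.count row 1 : Int) := by
  induction row with
  | nil => simp [rowSum, PySem.List.count]
  | cons x xs ih =>
    rw [List.length_cons]
    show (if (x :: xs).getD 0 0 = 1 then (1:Int) else 0) + rowSum (x :: xs) 1 xs.length = _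
    rw [rowSum_succ_cons, ih]
    simp [PySem.List.count_eq, List.count_cons]
    by_cases hx : x = 1 <;> simp [hx] <;> ring

theorem colSum_rect (tab : List (List Int)) (w : Nat) (h : ∀ row ∈ tab, row.length = w) :
    colSum tab 0 w = contar1 tab := by
  induction tab with
  | nil => simp [colSum_nil, contar1]
  | cons row rest ih =>
    rw [colSum_cons, contar1_cons, ih (fun r hr => h r (by simp [hr]))]
    have hw : row.length = w := h row (by simp)
    rw [← hw, rowSum_len]

theorem passColsB_step (tab : List (List Int)) (c fuel : Nat) (rem ones : Int)
    (h : 0 < rem) (hs : colSum tab c fuel ≠ 0) :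
    passColsB tab c fuel rem ones = passColsB (zeroColA tab c fuel) c fuel (rem - 1) ones := by
  induction fuel generalizing c tab ones with
  | zero => simp [colSum] at hs
  | succ fuel ih =>
    cases hf : findColA tab c with
    | some r =>
      simp only [passColsB]
      unfold zeroColA
      rw [hf]
      rw [passColRowsB_step tab c rem ones r h hf]
    | none =>
      have hnd := findColA_none tab c hf
      have hcnt := colCnt_of_none tab c hf
      have hs' : colSum tab (c + 1) fuel ≠ 0 := by
        rw [colSum] at hs; omega
      simp only [passColsB]
      unfold zeroColA
      rw [hf]
      rw [passColRowsB_none tab c rem ones hnd,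
          passColRowsB_none (zeroColA tab (c + 1) fuel) c (rem - 1) ones
            (zeroColA_col_preserve tab c (c + 1) fuel hnd)]
      simp only []
      exact ih tab (c + 1) ones hs'

theorem headD_mem (tab : List (List Int)) (h : tab ≠ []) : tab.headD [] ∈ tab := by
  cases tab with
  | nil => exact absurd rfl h
  | cons row rest => simp

-- ---------- main ----------
theorem count_zero_case (tab : List (List Int)) (elim : Int) (hc : contar1 tab = 0) :
    EliminarTab tab elim = EliminarTab_alt tab elim := by
  rw [EliminarTab]
  unfold EliminarTab_alt
  by_cases hpar : tab.length % 2 = 0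
  · rw [if_pos hpar, if_pos hpar, if_pos (Or.inr hc)]
    rw [passRowsB_no_one elim 0 tab hc, hc]
  · rw [if_neg hpar, if_neg hpar, if_pos (Or.inr hc)]
    rw [passColsB_no_one tab 0 _ elim 0 hc, hc]

theorem main_equiv (e : Nat) : ∀ (tab : List (List Int)) (elim : Int), elim.toNat ≤ e →
    (0 ≤ elim ∨ contar1 tab = 0) →
    (tab.length % 2 = 1 ∧ contar1 tab ≠ 0 → ∀ r ∈ tab, r.length = (tab.headD []).length) →
    EliminarTab tab elim = EliminarTab_alt tab elim := by
  induction e with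
  | zero =>
    intro tab elim he h0 hrect
    by_cases hc : contar1 tab = 0
    · exact count_zero_case tab elim hc
    have : elim = 0 := by rcases h0 with h0 | h0; omega; exact absurd h0 hc
    subst this
    rw [EliminarTab]
    unfold EliminarTab_alt
    by_cases hpar : tab.length % 2 = 0
    · rw [if_pos hpar, if_pos hpar, if_pos (Or.inl rfl)]
      rw [passRowsB_nonpos 0 0 tab le_rfl]
      simp
    · rw [if_neg hpar, if_neg hpar, if_pos (Or.inl rfl)]
      have hodd : tab.length % 2 = 1 := by omega
      rw [passColsB_nonpos tab 0 _ 0 0 le_rfl,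
          colSum_rect tab _ (hrect ⟨hodd, hc⟩)]
      simp
  | succ e ih =>
    intro tab elim he h0 hrect
    by_cases hc : contar1 tab = 0
    · exact count_zero_case tab elim hc
    have h0' : 0 ≤ elim := by rcases h0 with h0 | h0; exact h0; exact absurd h0 hc
    by_cases hz : elim = 0
    · subst hz
      rw [EliminarTab]
      unfold EliminarTab_alt
      by_cases hpar : tab.length % 2 = 0
      · rw [if_pos hpar, if_pos hpar, if_pos (Or.inl rfl)]
        rw [passRowsB_nonpos 0 0 tab le_rfl]
        simp
      · rw [if_neg hpar, if_neg hpar, if_pos (Or.inl rfl)]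
        have hodd : tab.length % 2 = 1 := by omega
        rw [passColsB_nonpos tab 0 _ 0 0 le_rfl,
            colSum_rect tab _ (hrect ⟨hodd, hc⟩)]
        simp
    · have hpos : 0 < elim := by omega
      rw [EliminarTab]
      unfold EliminarTab_alt
      by_cases hpar : tab.length % 2 = 0
      · rw [if_pos hpar, if_pos hpar, if_neg (by tauto), if_pos hpos]
        rw [passRowsB_step elim 0 tab hpos hc]
        have hlen : (zeroRowA tab).length = tab.length := zeroRowA_length tab
        rw [ih (zeroRowA tab) (elim - 1) (by omega) (Or.inl (by omega))
          (by rw [hlen]; omega)]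
        unfold EliminarTab_alt
        rw [if_pos (by rw [hlen]; exact hpar)]
      · have hodd : tab.length % 2 = 1 := by omega
        have hw := hrect ⟨hodd, hc⟩
        rw [if_neg hpar, if_neg hpar, if_neg (by tauto), if_pos hpos]
        set w := (tab.headD []).length with hwdef
        have hcs : colSum tab 0 w ≠ 0 := by rw [colSum_rect tab w hw]; exact hc
        rw [passColsB_step tab 0 w elim 0 hpos hcs]
        set tab' := zeroColA tab 0 w with htab'
        have hlen : tab'.length = tab.length := zeroColA_length tab 0 w
        have hne : tab' ≠ [] := by
          intro hnil
          rw [hnil] at hlen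
          simp at hlen
          omega
        have hrect' : ∀ r ∈ tab', r.length = w := zeroColA_rect tab 0 w w hw
        have hhead : (tab'.headD []).length = w := hrect' _ (headD_mem tab' hne)
        rw [ih tab' (elim - 1) (by omega) (Or.inl (by omega))
          (by intro _; rw [hhead]; intro r hr; rw [hrect' r hr])]
        unfold EliminarTab_alt
        rw [if_neg (by rw [hlen]; exact hpar), hhead]

-- ===== VERDICT (by name: the statement is the Claim_ definition above) =====
theorem EliminarTab_spec : Claim_equal_EliminarTab := by
  intro tab elim _ hpre
  unfold Spec_EliminarTab
  refine main_equiv elim.toNat tab elim le_rfl ?_ ?_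
  · rcases hpre.1 with h | h
    · exact Or.inl h
    · exact Or.inr ((contar1_eq_zero_iff tab).mpr h)
  · intro ⟨hodd, hc⟩
    exact hpre.2 ⟨hodd, fun hall => hc ((contar1_eq_zero_iff tab).mpr hall)⟩
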